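-- pv_equiv track=rewrite | github.com/gregoryperego-prog/inventory | tool/html_generator.py | format_km
-- ===== SOURCE A (Python) =====
-- def format_km(mileage):
--     """Format mileage Swiss style: 12000 -> 12'000"""
--     if not mileage:
--         return "0"
--     s = str(int(mileage))
--     groups = []
--     while s:
--         groups.append(s[-3:])
--         s = s[:-3]
--     return "'".join(reversed(groups))
-- ===== SOURCE B (Python) =====
-- def format_km(mileage):
--     """Format mileage Swiss style: 12000 -> 12'000"""
--     if not mileage:
--         return "0"
--     return f"{int(mileage):,}".replace(",", "'")
-- ===== Notes on version B (the rewrite author's own statement) =====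
-- stated objective: idiomatic
-- what changed: Replaces the hand-written while-loop that slices three-character groups off the signed string and joins them reversed with Python's built-in thousands formatting f"{n:,}" plus a one-character replace, which also groups the digits correctly for negative numbers.
-- intended difference: For negative mileage whose decimal digit count is divisible by three (e.g. -123, -123456) A groups the signed string from the right and returns a separator directly after the minus sign ("-'123", "-'123'456"); B returns the correctly grouped "-123" / "-123'456", which is the intended Swiss formatting. — e.g. on format_km(-123): A returns "-'123", B returns "-123"
import Mathlib
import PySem

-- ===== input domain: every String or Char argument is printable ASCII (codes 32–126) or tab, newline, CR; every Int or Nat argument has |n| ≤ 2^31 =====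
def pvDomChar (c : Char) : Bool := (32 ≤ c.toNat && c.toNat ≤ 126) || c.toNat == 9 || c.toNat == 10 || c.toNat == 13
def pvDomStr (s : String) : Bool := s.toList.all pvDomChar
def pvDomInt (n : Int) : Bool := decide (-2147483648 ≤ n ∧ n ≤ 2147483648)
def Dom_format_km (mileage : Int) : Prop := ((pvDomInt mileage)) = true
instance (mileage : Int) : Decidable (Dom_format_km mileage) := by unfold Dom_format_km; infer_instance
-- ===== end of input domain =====

-- B replaces A's while-loop (slice 3 chars off the right of the SIGNED string, join reversed)
-- with Python's built-in thousands formatter (sign emitted separately, digits of |n| grouped),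
-- which also groups negative numbers correctly.

-- ===== PORT A =====
-- the loop 'while s: groups.append(s[-3:]); s = s[:-3]', producing groups in append order;
-- the fuel argument (initial length of s) only makes the recursion structural
def pvGroupsAgo : Nat → List Char → List (List Char)
  | 0, _ => []
  | fuel+1, s =>
    if s = [] then []
    else PySem.List.slice s (some (-3)) none :: pvGroupsAgo fuel (PySem.List.slice s none (some (-3)))

def pvGroupsA (s : List Char) : List (List Char) := pvGroupsAgo s.length s

def format_km (mileage : Int) : String :=
  if mileage = 0 then "0"
  else String.ofList (PySem.Chars.join ['\''] (pvGroupsA (PySem.Int.toChars mileage)).reverse)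

-- ===== PORT B =====
-- hand port of CPython's thousands grouping f"{n:,}" (exact for int arguments, ',' already
-- replaced by "'"): the sign is emitted separately and the digits of |n| are grouped in
-- threes, here produced left to right (leading group of 1..3 digits, then groups of 3);
-- the fuel argument (initial length of t) only makes the recursion structural
def pvGrpGo : Nat → List Char → List Char
  | 0, t => t
  | fuel+1, t =>
    if t.length ≤ 3 then t
    else t.take ((t.length - 1) % 3 + 1) ++ '\'' :: pvGrpGo fuel (t.drop ((t.length - 1) % 3 + 1))

def pvGrp (t : List Char) : List Char := pvGrpGo t.length t

def format_km_alt (mileage : Int) : String :=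
  if mileage = 0 then "0"
  else if mileage < 0 then
    String.ofList ('-' :: pvGrp (PySem.Int.toChars (mileage.natAbs : Int)))
  else
    String.ofList (pvGrp (PySem.Int.toChars mileage))

-- ===== PRECONDITION & SPEC =====
-- For negative mileage whose decimal digit count is divisible by three (e.g. -123, -123456),
-- A slices the SIGNED string into three-character groups from the right, so the minus sign ends up
-- as a group of its own and A returns "-'123" / "-'123'456"; B returns the correctly grouped
-- "-123" / "-123'456", which is the intended Swiss formatting.
def D_format_km (mileage : Int) : Prop :=
  mileage < 0 ∧ (Nat.toDigits 10 mileage.natAbs).length % 3 = 0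
instance (mileage : Int) : Decidable (D_format_km mileage) := by unfold D_format_km; infer_instance

def Spec_format_km (mileage : Int) (out : String) : Prop :=
  ¬ D_format_km mileage → out = format_km_alt mileage
instance (mileage : Int) (out : String) : Decidable (Spec_format_km mileage out) := by
  unfold Spec_format_km; infer_instance

def pvDiffWitness_format_km : Int := (-123)
def pvDiffWitnessOut_format_km : String × String := ("-'123", "-123")

-- ===== CLAIM (what is proved, stated in full; the proofs are below) =====
def Claim_unchanged_format_km : Prop :=
  ∀ (mileage : Int), Dom_format_km mileage → Spec_format_km mileage (format_km mileage)
def Claim_changed_format_km : Prop :=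
  Dom_format_km (pvDiffWitness_format_km) ∧ D_format_km (pvDiffWitness_format_km) ∧
  format_km (pvDiffWitness_format_km) = pvDiffWitnessOut_format_km.1 ∧
  format_km_alt (pvDiffWitness_format_km) = pvDiffWitnessOut_format_km.2 ∧
  pvDiffWitnessOut_format_km.1 ≠ pvDiffWitnessOut_format_km.2
def Claim_exact_format_km : Prop :=
  ∀ (mileage : Int), Dom_format_km mileage → D_format_km mileage →
    format_km mileage ≠ format_km_alt mileage

-- ===== LEMMAS AND PROOFS =====

-- the fuel of A's loop is irrelevant as long as it is at least the length of s
theorem pvGroupsAgo_fuel : ∀ (f g : Nat) (s : List Char), s.length ≤ f → s.length ≤ g →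
    pvGroupsAgo f s = pvGroupsAgo g s := by
  intro f
  induction f with
  | zero =>
    intro g s hf hg
    have : s = [] := List.eq_nil_of_length_eq_zero (by omega)
    subst this
    cases g <;> simp [pvGroupsAgo]
  | succ f ih =>
    intro g s hf hg
    by_cases hs : s = []
    · subst hs; cases g <;> simp [pvGroupsAgo]
    · have hlen : 0 < s.length := List.length_pos_iff.mpr hs
      cases g with
      | zero => omega
      | succ g =>
        simp only [pvGroupsAgo, if_neg hs]
        congr 1
        rw [PySem.List.slice_to_neg_ofNat s 3 (by omega)]
        have h1 : (List.take (s.length - 3) s).length ≤ f := by simp [List.length_take]; omega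
        have h2 : (List.take (s.length - 3) s).length ≤ g := by simp [List.length_take]; omega
        exact ih g _ h1 h2

-- one unfolding of A's loop
theorem pvGroupsA_cons (s : List Char) (h : s ≠ []) :
    pvGroupsA s = PySem.List.slice s (some (-3)) none :: pvGroupsA (PySem.List.slice s none (some (-3))) := by
  have hlen : 0 < s.length := List.length_pos_iff.mpr h
  obtain ⟨k, hk⟩ : ∃ k, s.length = k + 1 := ⟨s.length - 1, by omega⟩
  unfold pvGroupsA
  rw [hk]
  simp only [pvGroupsAgo, if_neg h]
  congr 1
  rw [PySem.List.slice_to_neg_ofNat s 3 (by omega)]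
  exact pvGroupsAgo_fuel k _ _ (by simp; omega) (by simp)

theorem pvGroupsA_nil : pvGroupsA [] = [] := by simp [pvGroupsA, pvGroupsAgo]

theorem pvGroupsA_ne_nil (t : List Char) (h : t ≠ []) : pvGroupsA t ≠ [] := by
  rw [pvGroupsA_cons t h]; simp

-- the fuel of B's grouping is irrelevant as long as it is within 3 of the length of t
theorem pvGrpGo_fuel : ∀ (f g : Nat) (t : List Char), t.length ≤ f + 3 → t.length ≤ g + 3 →
    pvGrpGo f t = pvGrpGo g t := by
  intro f
  induction f with
  | zero =>
    intro g t hf hg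
    have h3 : t.length ≤ 3 := by omega
    cases g <;> simp [pvGrpGo, h3]
  | succ f ih =>
    intro g t hf hg
    by_cases h3 : t.length ≤ 3
    · cases g <;> simp [pvGrpGo, h3]
    · cases g with
      | zero => omega
      | succ g =>
        simp only [pvGrpGo, if_neg h3]
        congr 2
        exact ih g _ (by simp [List.length_drop]; omega) (by simp [List.length_drop]; omega)

theorem pvGrp_le (t : List Char) (h : t.length ≤ 3) : pvGrp t = t := by
  unfold pvGrp
  cases hl : t.length <;> simp_all [pvGrpGo]

-- one unfolding of B's grouping
theorem pvGrp_gt (t : List Char) (h : 3 < t.length) :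
    pvGrp t = t.take ((t.length - 1) % 3 + 1) ++ '\'' :: pvGrp (t.drop ((t.length - 1) % 3 + 1)) := by
  obtain ⟨k, hk⟩ : ∃ k, t.length = k + 1 := ⟨t.length - 1, by omega⟩
  conv_lhs => rw [pvGrp, hk]
  simp only [pvGrpGo, if_neg (by omega : ¬ t.length ≤ 3)]
  rw [pvGrp]
  congr 2
  exact pvGrpGo_fuel k _ _ (by simp [List.length_drop]; omega) (by omega)

-- "'".join over a group list with one more group appended at the end
theorem pv_join_append (as : List (List Char)) (b : List Char) (h : as ≠ []) :
    PySem.Chars.join ['\''] (as ++ [b]) = PySem.Chars.join ['\''] as ++ '\'' :: b := by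
  induction as with
  | nil => cases h rfl
  | cons p rest ih =>
    cases rest with
    | nil => simp [PySem.Chars.join_singleton, PySem.Chars.join_cons_cons]
    | cons q rest' =>
      rw [show (p :: q :: rest') ++ [b] = p :: q :: (rest' ++ [b]) from by simp,
          PySem.Chars.join_cons_cons, PySem.Chars.join_cons_cons,
          show q :: (rest' ++ [b]) = (q :: rest') ++ [b] from by simp, ih (by simp)]
      simp

-- B's left-to-right grouping also satisfies A's "split the last 3 characters off" recurrence
theorem pvGrp_right_split : ∀ (n : Nat) (t : List Char), t.length = n → 3 < n →
    pvGrp t = pvGrp (t.take (n - 3)) ++ '\'' :: t.drop (n - 3) := by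
  intro n
  induction n using Nat.strong_induction_on with
  | _ n ih =>
    intro t hn h3
    subst hn
    rw [pvGrp_gt t h3]
    by_cases h6 : t.length ≤ 6
    · have hk : (t.length - 1) % 3 + 1 = t.length - 3 := by omega
      rw [hk, pvGrp_le (t.drop (t.length - 3)) (by simp [List.length_drop]; omega),
          pvGrp_le (t.take (t.length - 3)) (by simp [List.length_take]; omega)]
    · have hk3 : (t.length - 1) % 3 + 1 ≤ 3 := by omega
      set k := (t.length - 1) % 3 + 1 with hkdef
      have hlen_drop : (t.drop k).length = t.length - k := by simp [List.length_drop]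
      have hd3 : 3 < (t.drop k).length := by rw [hlen_drop]; omega
      rw [ih (t.drop k).length (by omega) (t.drop k) rfl hd3]
      have e1 : (t.drop k).drop ((t.drop k).length - 3) = t.drop (t.length - 3) := by
        rw [List.drop_drop, hlen_drop]; congr 1; omega
      have e2 : (t.drop k).take ((t.drop k).length - 3) = (t.take (t.length - 3)).drop k := by
        rw [List.drop_take, hlen_drop]; congr 1; omega
      rw [e1, e2]
      have hlt : 3 < (t.take (t.length - 3)).length := by simp [List.length_take]; omega
      rw [pvGrp_gt _ hlt]
      have hlen_take : (t.take (t.length - 3)).length = t.length - 3 := by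
        simp only [List.length_take]; omega
      have hk' : ((t.take (t.length - 3)).length - 1) % 3 + 1 = k := by rw [hlen_take]; omega
      rw [hk', List.take_take]
      have : min k (t.length - 3) = k := by omega
      rw [this]
      simp

-- A's loop ≡ B's grouping on a sign-free digit string
theorem pv_main : ∀ (n : Nat) (t : List Char), t.length = n → t ≠ [] →
    PySem.Chars.join ['\''] (pvGroupsA t).reverse = pvGrp t := by
  intro n
  induction n using Nat.strong_induction_on with
  | _ n ih =>
    intro t hn h
    subst hn
    rw [pvGroupsA_cons t h, PySem.List.slice_from_neg_ofNat t 3 (by omega),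
        PySem.List.slice_to_neg_ofNat t 3 (by omega)]
    by_cases h3 : t.length ≤ 3
    · have h0 : t.length - 3 = 0 := by omega
      rw [h0]
      simp [pvGroupsA_nil, PySem.Chars.join_singleton, pvGrp_le t h3]
    · have hne : t.take (t.length - 3) ≠ [] := by
        intro hc
        have := congrArg List.length hc
        simp [List.length_take] at this
        omega
      rw [List.reverse_cons,
          pv_join_append _ _ (by simpa using pvGroupsA_ne_nil _ hne),
          ih (t.take (t.length - 3)).length (by simp [List.length_take]; omega) _ rfl hne,
          pvGrp_right_split t.length t rfl (by omega)]

-- A's loop on '-' :: t: correct when t's length is not a multiple of 3, an extra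
-- separator right after the sign when it is
theorem pv_neg : ∀ (n : Nat) (t : List Char), t.length = n → t ≠ [] →
    PySem.Chars.join ['\''] (pvGroupsA ('-' :: t)).reverse =
      (if t.length % 3 = 0
       then '-' :: '\'' :: PySem.Chars.join ['\''] (pvGroupsA t).reverse
       else '-' :: PySem.Chars.join ['\''] (pvGroupsA t).reverse) := by
  intro n
  induction n using Nat.strong_induction_on with
  | _ n ih =>
    intro t hn h
    subst hn
    by_cases h2 : t.length ≤ 2
    · have hmod : ¬ t.length % 3 = 0 := by
        have : 0 < t.length := List.length_pos_iff.mpr h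
        omega
      rw [if_neg hmod]
      rw [pvGroupsA_cons ('-' :: t) (by simp), PySem.List.slice_from_neg_ofNat _ 3 (by omega),
          PySem.List.slice_to_neg_ofNat _ 3 (by omega)]
      have hl : ('-' :: t).length - 3 = 0 := by simp; omega
      rw [hl]
      rw [pvGroupsA_cons t h, PySem.List.slice_from_neg_ofNat t 3 (by omega),
          PySem.List.slice_to_neg_ofNat t 3 (by omega)]
      have hl2 : t.length - 3 = 0 := by omega
      rw [hl2]
      simp [pvGroupsA_nil, PySem.Chars.join_singleton]
    · by_cases heq3 : t.length = 3
      · rw [if_pos (by omega)]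
        rw [pvGroupsA_cons ('-' :: t) (by simp), PySem.List.slice_from_neg_ofNat _ 3 (by omega),
            PySem.List.slice_to_neg_ofNat _ 3 (by omega)]
        have hl : ('-' :: t).length - 3 = 1 := by simp; omega
        rw [hl]
        have hdrop : ('-' :: t).drop 1 = t := rfl
        have htake : ('-' :: t).take 1 = ['-'] := rfl
        rw [hdrop, htake]
        rw [pvGroupsA_cons ['-'] (by simp), PySem.List.slice_from_neg_ofNat _ 3 (by omega),
            PySem.List.slice_to_neg_ofNat _ 3 (by omega)]
        rw [pvGroupsA_cons t h, PySem.List.slice_from_neg_ofNat t 3 (by omega),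
            PySem.List.slice_to_neg_ofNat t 3 (by omega)]
        have hl2 : t.length - 3 = 0 := by omega
        rw [hl2]
        simp [pvGroupsA_nil, PySem.Chars.join_singleton, PySem.Chars.join_cons_cons]
      · -- t.length ≥ 4
        have h4 : 4 ≤ t.length := by omega
        rw [pvGroupsA_cons ('-' :: t) (by simp), PySem.List.slice_from_neg_ofNat _ 3 (by omega),
            PySem.List.slice_to_neg_ofNat _ 3 (by omega)]
        have hl : ('-' :: t).length - 3 = (t.length - 3 - 1) + 1 + 1 := by
          simp only [List.length_cons]; omega
        rw [hl]
        have hdrop : ('-' :: t).drop ((t.length - 3 - 1) + 1 + 1) = t.drop (t.length - 3) := by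
          rw [List.drop_succ_cons]; congr 1; omega
        have htake : ('-' :: t).take ((t.length - 3 - 1) + 1 + 1) = '-' :: t.take (t.length - 3) := by
          rw [List.take_succ_cons]; congr 2; omega
        rw [hdrop, htake]
        have hne : t.take (t.length - 3) ≠ [] := by
          intro hc
          have := congrArg List.length hc
          simp [List.length_take] at this
          omega
        have hlt : (t.take (t.length - 3)).length = t.length - 3 := by
          simp only [List.length_take]; omega
        rw [List.reverse_cons,
            pv_join_append _ _ (by simpa using pvGroupsA_ne_nil _ (by simp)),
            ih (t.take (t.length - 3)).length (by omega) _ rfl hne]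
        rw [pvGroupsA_cons t h, PySem.List.slice_from_neg_ofNat t 3 (by omega),
            PySem.List.slice_to_neg_ofNat t 3 (by omega), List.reverse_cons,
            pv_join_append _ _ (by simpa using pvGroupsA_ne_nil _ hne)]
        rw [hlt]
        have hmm : (t.length - 3) % 3 = t.length % 3 := by omega
        rw [hmm]
        by_cases hmod : t.length % 3 = 0
        · rw [if_pos hmod, if_pos hmod]; simp
        · rw [if_neg hmod, if_neg hmod]; simp

-- str(n) has at least one character
theorem pv_toDigitsCore_len (b : Nat) : ∀ (f n : Nat) (ds : List Char),
    ds.length < (Nat.toDigitsCore b (f+1) n ds).length := by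
  intro f
  induction f with
  | zero =>
    intro n ds
    rw [Nat.toDigitsCore.eq_def]
    split
    · simp_all
    · rename_i fuel heq
      obtain rfl : fuel = 0 := by omega
      dsimp only
      split
      · simp
      · simp [Nat.toDigitsCore]
  | succ f ih =>
    intro n ds
    rw [Nat.toDigitsCore.eq_def]
    split
    · simp_all
    · rename_i fuel heq
      obtain rfl : fuel = f + 1 := by omega
      dsimp only
      split
      · simp
      · exact Nat.lt_trans (by simp) (ih _ _)

theorem pv_toDigits_ne_nil (m : Nat) : Nat.toDigits 10 m ≠ [] := by
  have h := pv_toDigitsCore_len 10 m m []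
  unfold Nat.toDigits at *
  intro he; rw [he] at h; simp at h

theorem pv_toChars_neg (m : Int) (h : m < 0) :
    PySem.Int.toChars m = '-' :: Nat.toDigits 10 m.natAbs := by
  simp [PySem.Int.toChars, h]

theorem pv_toChars_natAbs (m : Int) :
    PySem.Int.toChars (m.natAbs : Int) = Nat.toDigits 10 m.natAbs := by
  unfold PySem.Int.toChars
  rw [if_neg (by simp : ¬ ((m.natAbs : Int) < 0)), Int.toNat_natCast]

-- ===== VERDICT (by name: the statement is the Claim_ definition above) =====
theorem format_km_spec : Claim_unchanged_format_km := by
  unfold Claim_unchanged_format_km Spec_format_km D_format_km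
  intro m _ hnD
  by_cases h0 : m = 0
  · simp [format_km, format_km_alt, h0]
  · by_cases hneg : m < 0
    · have hmod : (Nat.toDigits 10 m.natAbs).length % 3 ≠ 0 := fun hc => hnD ⟨hneg, hc⟩
      have hne := pv_toDigits_ne_nil m.natAbs
      rw [format_km, if_neg h0, pv_toChars_neg m hneg,
          pv_neg (Nat.toDigits 10 m.natAbs).length _ rfl hne, if_neg hmod,
          pv_main (Nat.toDigits 10 m.natAbs).length _ rfl hne]
      rw [format_km_alt, if_neg h0, if_pos hneg, pv_toChars_natAbs]
    · have hto : PySem.Int.toChars m = Nat.toDigits 10 m.toNat := by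
        simp [PySem.Int.toChars, hneg]
      have hne := pv_toDigits_ne_nil m.toNat
      rw [format_km, if_neg h0, hto,
          pv_main (Nat.toDigits 10 m.toNat).length _ rfl hne]
      rw [format_km_alt, if_neg h0, if_neg hneg, hto]

theorem format_km_changed : Claim_changed_format_km := by
  unfold Claim_changed_format_km; decide

theorem format_km_tight : Claim_exact_format_km := by
  unfold Claim_exact_format_km D_format_km
  intro m _ ⟨hneg, hmod⟩
  have h0 : m ≠ 0 := by omega
  have hne := pv_toDigits_ne_nil m.natAbs
  rw [format_km, if_neg h0, pv_toChars_neg m hneg,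
      pv_neg (Nat.toDigits 10 m.natAbs).length _ rfl hne, if_pos hmod,
      pv_main (Nat.toDigits 10 m.natAbs).length _ rfl hne]
  rw [format_km_alt, if_neg h0, if_pos hneg, pv_toChars_natAbs]
  intro hc
  have := congrArg String.toList hc
  simp [String.toList_ofList] at this
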